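-- pv_equiv track=rewrite | github.com/davidluzhiyun/COMPSCI260_Introduction_to_Computational_Genomics | PS3/bwt.py | custom_compare
-- ===== SOURCE A (Python) =====
-- def custom_compare(a, b):
--     if a[0] == b[0]:
--         if len(a) > 1:
--             return custom_compare(a[1:], b[1:])
--         else:
--             return 0
--     if b[0] == "$":
--         return 1
--     if a[0] == "$":
--         return -1
--     return default_cmp(a[0], b[0])
--
-- def default_cmp(a, b):
--     return (a > b) - (a < b)
-- ===== SOURCE B (Python) =====
-- def custom_compare(a, b):
--     for i in range(len(a)):
--         ca = a[i]
--         cb = b[i]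
--         if ca == cb:
--             continue
--         if cb == "$":
--             return 1
--         if ca == "$":
--             return -1
--         return -1 if ca < cb else 1
--     return 0
-- ===== Notes on version B (the rewrite author's own statement) =====
-- stated objective: faster
-- what changed: Replaced A's recursion over slice copies (each step allocates a[1:] and b[1:]) by a single index-based loop over the characters, comparing in place.
import Mathlib
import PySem

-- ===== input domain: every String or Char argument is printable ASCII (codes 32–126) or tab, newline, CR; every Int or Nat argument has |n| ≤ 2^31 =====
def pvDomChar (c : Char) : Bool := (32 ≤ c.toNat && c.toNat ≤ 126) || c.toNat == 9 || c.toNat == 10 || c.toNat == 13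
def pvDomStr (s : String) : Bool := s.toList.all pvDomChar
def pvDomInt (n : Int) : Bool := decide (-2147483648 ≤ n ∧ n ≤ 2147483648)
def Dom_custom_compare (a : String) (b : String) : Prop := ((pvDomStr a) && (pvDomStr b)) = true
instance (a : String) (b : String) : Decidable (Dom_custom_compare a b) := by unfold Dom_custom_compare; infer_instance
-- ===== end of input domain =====

-- B replaces A's slice-copying recursion by one in-place index loop; faster (asymptotic).
-- ===== PORT A =====
-- default_cmp(a, b) = (a > b) - (a < b) on single characters (Python compares by code point)
def default_cmp (x : Char) (y : Char) : Int :=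
  (if x > y then (1 : Int) else 0) - (if x < y then (1 : Int) else 0)

-- literal transliteration of A's recursion; the [] cases are IndexError in Python (outside Pre_)
def ccA : List Char → List Char → Int
  | [], _ => 0
  | _, [] => 0
  | x :: xs, y :: ys =>
    if x == y then
      if (x :: xs).length > 1 then ccA xs ys else 0
    else if y == '$' then 1
    else if x == '$' then -1
    else default_cmp x y

def custom_compare (a : String) (b : String) : Int := ccA a.toList b.toList

-- ===== PORT B =====
-- index loop of Source B; out-of-range b[i] is IndexError in Python (outside Pre_), getD default is arbitrary
def ccB (la lb : List Char) (i : Nat) : Int :=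
  if i < la.length then
    if la.getD i ' ' == lb.getD i ' ' then ccB la lb (i + 1)
    else if lb.getD i ' ' == '$' then 1
    else if la.getD i ' ' == '$' then -1
    else if la.getD i ' ' < lb.getD i ' ' then -1 else 1
  else 0
termination_by la.length - i

def custom_compare_alt (a : String) (b : String) : Int := ccB a.toList b.toList 0

-- ===== PRECONDITION & SPEC =====
-- Pre_ is exactly A's return domain: A raises IndexError when a is empty, or when b is a
-- proper prefix of a shorter than a (the recursion runs b out before a's last character).
def Pre_custom_compare (a : String) (b : String) : Prop :=
  a.toList ≠ [] ∧ (a.toList.length ≤ b.toList.length ∨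
    ∃ i < b.toList.length, a.toList.getD i ' ' ≠ b.toList.getD i ' ')
instance (a : String) (b : String) : Decidable (Pre_custom_compare a b) := by
  unfold Pre_custom_compare; infer_instance

def pvWitness_custom_compare : String × String := ("ab$", "a$")

def Spec_custom_compare (a : String) (b : String) (out : Int) : Prop := out = custom_compare_alt a b
instance (a : String) (b : String) (out : Int) : Decidable (Spec_custom_compare a b out) := by unfold Spec_custom_compare; infer_instance

-- ===== CLAIM (what is proved, stated in full; the proofs are below) =====
def Claim_equal_custom_compare : Prop := ∀ (a : String) (b : String), Dom_custom_compare a b → Pre_custom_compare a b → Spec_custom_compare a b (custom_compare a b)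

-- ===== LEMMAS AND PROOFS =====

theorem ccB_shift (x y : Char) (la lb : List Char) (i : Nat) :
    ccB (x :: la) (y :: lb) (i + 1) = ccB la lb i := by
  conv_lhs => rw [ccB]
  conv_rhs => rw [ccB]
  simp only [List.length_cons, List.getD_cons_succ]
  by_cases h : i < la.length
  · rw [if_pos (by omega), if_pos h]
    split_ifs
    · exact ccB_shift x y la lb (i + 1)
    all_goals rfl
  · rw [if_neg (by omega), if_neg h]
termination_by la.length - i

theorem ccA_eq_ccB (la lb : List Char)
    (h1 : la ≠ [])
    (h2 : la.length ≤ lb.length ∨ ∃ i < lb.length, la.getD i ' ' ≠ lb.getD i ' ') :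
    ccA la lb = ccB la lb 0 := by
  induction la generalizing lb with
  | nil => exact absurd rfl h1
  | cons x xs ih =>
    cases lb with
    | nil =>
      rcases h2 with h | ⟨i, hi, _⟩
      · simp at h
      · simp at hi
    | cons y ys =>
      rw [ccA]
      have hlen : 0 < (x :: xs).length := by simp
      conv_rhs => rw [ccB, if_pos hlen]
      simp only [List.getD_cons_zero]
      by_cases hxy : x = y
      · subst hxy
        conv_lhs => rw [if_pos (show (x == x) = true by simp)]
        conv_rhs => rw [if_pos (show (x == x) = true by simp)]
        cases xs with
        | nil =>
          conv_lhs => rw [if_neg (show ¬ ([x].length > 1) by simp)]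
          rw [ccB_shift, ccB]
          simp
        | cons z zs =>
          conv_lhs => rw [if_pos (show (x :: z :: zs).length > 1 by simp)]
          rw [ccB_shift]
          refine ih ys (by simp) ?_
          rcases h2 with h | ⟨i, hi, hne⟩
          · left; simpa using h
          · cases i with
            | zero => simp at hne
            | succ j =>
              right
              exact ⟨j, by simpa using hi, by simpa using hne⟩
      · have hbe : ¬ ((x == y) = true) := by simpa using hxy
        conv_lhs => rw [if_neg hbe]
        conv_rhs => rw [if_neg hbe]
        split_ifs with hy hx hord
        · rfl
        · rfl
        · have hnl : ¬ x > y := not_lt.mpr (le_of_lt hord)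
          simp [default_cmp, hord, hnl]
        · have hgt : y < x := lt_of_le_of_ne (not_lt.mp hord) (fun h => hxy h.symm)
          simp [default_cmp, hgt, hord]

-- ===== VERDICT (by name: the statement is the Claim_ definition above) =====
theorem custom_compare_spec : Claim_equal_custom_compare := by
  intro a b _ hpre
  unfold Spec_custom_compare custom_compare custom_compare_alt
  exact ccA_eq_ccB a.toList b.toList hpre.1 hpre.2
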